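-- pv_equiv track=rewrite | github.com/ronakdinesh/ADDED_policy_simulation_september | Archive/Reference Code/report_creation_agent.py | _extract_from_history
-- ===== SOURCE A (Python) =====
-- def _extract_from_history(history: list) -> dict:
--     """Extract information from message history"""
--     info = {
--         "business_domain": "",
--         "objective": "",
--         "platform": "",
--         "frequency": "",
--         "stakeholders": "",
--         "data_sources": "",
--         "required_by": ""
--     }
--
--     for msg in history:
--         if isinstance(msg, dict):
--             # Update info with any previously collected information
--             for key in info:
--                 if msg.get(key):
--                     info[key] = msg[key]
--
--     return info
-- ===== SOURCE B (Python) =====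
-- def _extract_from_history(history: list) -> dict:
--     """Extract information from message history"""
--     keys = ("business_domain", "objective", "platform", "frequency",
--             "stakeholders", "data_sources", "required_by")
--     return {
--         k: next((m[k] for m in reversed(history)
--                  if isinstance(m, dict) and m.get(k)), "")
--         for k in keys
--     }
-- ===== Notes on version B (the rewrite author's own statement) =====
-- stated objective: idiomatic
-- what changed: Replaces A's forward sweep that overwrites a mutable dict for every message with a dict comprehension that, for each of the seven fixed keys, takes the first truthy value found scanning the history in reverse (next over reversed(history)).
import Mathlib
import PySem

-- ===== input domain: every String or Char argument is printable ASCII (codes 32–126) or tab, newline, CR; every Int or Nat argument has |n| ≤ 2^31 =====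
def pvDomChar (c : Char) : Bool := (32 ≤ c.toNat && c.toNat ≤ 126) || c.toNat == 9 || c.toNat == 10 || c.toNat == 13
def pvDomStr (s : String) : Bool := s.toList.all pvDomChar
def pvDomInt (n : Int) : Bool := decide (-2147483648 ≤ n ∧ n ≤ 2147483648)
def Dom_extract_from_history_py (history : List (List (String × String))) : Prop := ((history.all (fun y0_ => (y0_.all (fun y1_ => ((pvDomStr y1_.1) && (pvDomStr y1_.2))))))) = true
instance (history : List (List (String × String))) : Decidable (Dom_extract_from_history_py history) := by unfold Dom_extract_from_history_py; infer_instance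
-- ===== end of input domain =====

-- B changes the decomposition only: a per-key reverse search instead of A's mutating forward sweep; same cost, same results.

-- ===== PORT A =====
-- A builds a dict of seven empty-string entries, then for each message overwrites
-- each key whose value in the message is truthy (a non-empty string).
def extract_from_history_py (history : List (List (String × String))) : List (String × String) :=
  let info0 : PySem.Dict String String := PySem.Dict.ofList
    [("business_domain", ""), ("objective", ""), ("platform", ""), ("frequency", ""),
     ("stakeholders", ""), ("data_sources", ""), ("required_by", "")]
  -- 'isinstance(msg, dict)' is always true under the type convention (msg : dict)
  (history.foldl (fun info msg =>
      let m := PySem.Dict.ofList msg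
      (PySem.Dict.keys info).foldl (fun i k =>
        if m.getD k "" ≠ "" then i.insert k (m.getD k "") else i) info)
    info0).items

-- ===== PORT B =====
def pvKeysB : List String :=
  ["business_domain", "objective", "platform", "frequency",
   "stakeholders", "data_sources", "required_by"]

-- B: dict comprehension over the seven keys; each value is the first truthy hit
-- scanning history in reverse ('next(... reversed(history) ...)', default "").
def extract_from_history_py_alt (history : List (List (String × String))) : List (String × String) :=
  pvKeysB.map (fun k =>
    (k, match history.reverse.find? (fun msg => decide ((PySem.Dict.ofList msg).getD k "" ≠ "")) with
        | some msg => (PySem.Dict.ofList msg).getD k ""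
        | none => ""))

-- ===== PRECONDITION & SPEC =====
def Spec_extract_from_history_py (history : List (List (String × String))) (out : List (String × String)) : Prop := out = extract_from_history_py_alt history
instance (history : List (List (String × String))) (out : List (String × String)) : Decidable (Spec_extract_from_history_py history out) := by unfold Spec_extract_from_history_py; infer_instance

-- ===== CLAIM (what is proved, stated in full; the proofs are below) =====
def Claim_equal_extract_from_history_py : Prop := ∀ (history : List (List (String × String))), Dom_extract_from_history_py history → Spec_extract_from_history_py history (extract_from_history_py history)

-- ===== LEMMAS AND PROOFS =====

-- B's per-key value as a function of a per-key default g
def pvLastVal (g : String → String) (k : String) (hs : List (List (String × String))) : String :=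
  match hs.reverse.find? (fun msg => decide ((PySem.Dict.ofList msg).getD k "" ≠ "")) with
  | some msg => (PySem.Dict.ofList msg).getD k ""
  | none => g k

-- inner loop of A: a pass over l of conditional inserts on a map-shaped dict
theorem pv_inner (l ks : List String) (c : String → Prop) [DecidablePred c]
    (v : String → String) (g : String → String) (hl : ∀ x ∈ l, x ∈ ks) :
    l.foldl (fun i k => if c k then i.insert k (v k) else i)
      (PySem.Dict.mk (ks.map (fun k => (k, g k)))) =
    PySem.Dict.mk (ks.map (fun k => (k, if k ∈ l ∧ c k then v k else g k))) := by
  induction l generalizing g with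
  | nil => simp
  | cons a t ih =>
    have ha : a ∈ ks := hl a (List.mem_cons_self ..)
    have hcont : (PySem.Dict.mk (ks.map (fun k => (k, g k)))).contains a = true := by
      rw [PySem.Dict.contains_mk, List.any_map]
      exact List.any_eq_true.mpr ⟨a, ha, by simp⟩
    have hstep : (if c a then (PySem.Dict.mk (ks.map (fun k => (k, g k)))).insert a (v a)
                  else PySem.Dict.mk (ks.map (fun k => (k, g k)))) =
        PySem.Dict.mk (ks.map (fun k => (k, if k = a ∧ c k then v k else g k))) := by
      by_cases hca : c a
      · simp only [if_pos hca]
        apply PySem.Dict.ext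
        rw [PySem.Dict.items_insert_of_contains _ _ hcont]
        simp only [List.map_map]
        apply List.map_congr_left
        intro x _
        by_cases hx : x = a
        · subst hx; simp [hca]
        · simp [hx, Function.comp]
      · simp only [if_neg hca]
        apply PySem.Dict.ext
        simp only
        apply List.map_congr_left
        intro x _
        by_cases hx : x = a
        · subst hx; simp [hca]
        · simp [hx]
    simp only [List.foldl_cons, hstep,
      ih (fun k => if k = a ∧ c k then v k else g k) (fun x hx => hl x (List.mem_cons_of_mem _ hx))]
    apply PySem.Dict.ext
    simp only
    apply List.map_congr_left
    intro x _
    by_cases hx : x = a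
    · subst hx
      by_cases hcx : c x <;> simp [hcx]
    · by_cases hxt : x ∈ t <;> simp [hx, hxt]

-- outer loop of A: the whole fold keeps the dict in map shape, values = last truthy hit
theorem pv_outer (hs : List (List (String × String))) (g : String → String) :
    hs.foldl (fun info msg =>
        let m := PySem.Dict.ofList msg
        (PySem.Dict.keys info).foldl (fun i k =>
          if m.getD k "" ≠ "" then i.insert k (m.getD k "") else i) info)
      (PySem.Dict.mk (pvKeysB.map (fun k => (k, g k)))) =
    PySem.Dict.mk (pvKeysB.map (fun k => (k, pvLastVal g k hs))) := by
  induction hs generalizing g with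
  | nil =>
    apply PySem.Dict.ext
    simp only
    apply List.map_congr_left
    intro x _
    simp [pvLastVal]
  | cons m t ih =>
    have hkeys : PySem.Dict.keys (PySem.Dict.mk (pvKeysB.map (fun k => (k, g k)))) = pvKeysB := by
      simp [PySem.Dict.keys, List.map_map, Function.comp_def]
    simp only [List.foldl_cons, hkeys]
    rw [pv_inner pvKeysB pvKeysB (fun k => (PySem.Dict.ofList m).getD k "" ≠ "")
        (fun k => (PySem.Dict.ofList m).getD k "") g (fun x hx => hx)]
    rw [ih]
    apply PySem.Dict.ext
    simp only
    apply List.map_congr_left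
    intro x hx
    have : pvLastVal (fun k => if k ∈ pvKeysB ∧ (PySem.Dict.ofList m).getD k "" ≠ "" then (PySem.Dict.ofList m).getD k "" else g k) x t
        = pvLastVal g x (m :: t) := by
      unfold pvLastVal
      rw [List.reverse_cons, List.find?_append]
      cases hfind : t.reverse.find? (fun msg => decide ((PySem.Dict.ofList msg).getD x "" ≠ "")) with
      | some m' => simp
      | none =>
        by_cases hm : (PySem.Dict.ofList m).getD x "" ≠ "" <;>
          simp [List.find?, hm, hx]
    rw [this]

-- ===== VERDICT (by name: the statement is the Claim_ definition above) =====
theorem extract_from_history_py_spec : Claim_equal_extract_from_history_py := by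
  intro history _
  show extract_from_history_py history = extract_from_history_py_alt history
  unfold extract_from_history_py extract_from_history_py_alt
  have h0 : PySem.Dict.ofList
      [("business_domain", ""), ("objective", ""), ("platform", ""), ("frequency", ""),
       ("stakeholders", ""), ("data_sources", ""), ("required_by", "")] =
      PySem.Dict.mk (pvKeysB.map (fun k => (k, (fun _ => "") k))) := by decide
  simp only [h0]
  rw [pv_outer history (fun _ => "")]
  rfl
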